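-- pv_equiv track=rewrite | github.com/SHawnHardy/ACM_CTF | LintCode/1021/main.py | func
-- ===== SOURCE A (Python) =====
-- def func(A, x):
--     result = 0
--     l = r = 0
--     while r < len(A):
--         if A[r] > x:
--             result += (1 + (r - l)) * (r - l) // 2
--             l = r + 1
--         r += 1
--     result += (1 + (r - l)) * (r - l) // 2
--     return result
-- ===== SOURCE B (Python) =====
-- def func(A, x):
--     result = 0
--     cur = 0
--     for a in A:
--         if a <= x:
--             cur += 1
--             result += cur
--         else:
--             cur = 0
--     return result
-- ===== Notes on version B (the rewrite author's own statement) =====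
-- stated objective: simpler
-- what changed: Replaces the two-pointer run tracking with closed-form triangular sums k(k+1)//2 at each run boundary by a single running run-length counter whose value is added to the result at every element.
import Mathlib
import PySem

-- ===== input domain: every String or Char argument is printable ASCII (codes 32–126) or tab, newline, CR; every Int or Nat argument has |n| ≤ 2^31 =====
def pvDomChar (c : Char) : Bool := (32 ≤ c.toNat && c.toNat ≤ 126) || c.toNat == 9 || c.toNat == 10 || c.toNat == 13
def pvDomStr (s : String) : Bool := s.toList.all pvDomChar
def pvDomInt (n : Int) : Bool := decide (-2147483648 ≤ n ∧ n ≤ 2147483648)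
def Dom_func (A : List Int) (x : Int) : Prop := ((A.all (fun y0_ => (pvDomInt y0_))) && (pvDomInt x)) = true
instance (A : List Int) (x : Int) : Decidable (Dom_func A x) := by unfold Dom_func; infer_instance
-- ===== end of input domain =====

-- B replaces the closed-form triangular sum per run with an incremental running counter; objective: simpler.
-- ===== PORT A =====
-- while loop over r = 0..len A-1 reading A[r]: ported as a fold over the elements with state (result, l, r)
def func (A : List Int) (x : Int) : Int :=
  let s := A.foldl (fun (st : Int × Int × Int) a =>
    if a > x then
      (st.1 + PySem.Int.floordiv ((1 + (st.2.2 - st.2.1)) * (st.2.2 - st.2.1)) 2, st.2.2 + 1, st.2.2 + 1)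
    else
      (st.1, st.2.1, st.2.2 + 1)) (0, 0, 0)
  s.1 + PySem.Int.floordiv ((1 + (s.2.2 - s.2.1)) * (s.2.2 - s.2.1)) 2

-- ===== PORT B =====
def func_alt (A : List Int) (x : Int) : Int :=
  (A.foldl (fun (st : Int × Int) a =>
    if a ≤ x then (st.1 + (st.2 + 1), st.2 + 1) else (st.1, 0)) (0, 0)).1

-- ===== PRECONDITION & SPEC =====
def Spec_func (A : List Int) (x : Int) (out : Int) : Prop := out = func_alt A x
instance (A : List Int) (x : Int) (out : Int) : Decidable (Spec_func A x out) := by unfold Spec_func; infer_instance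

-- ===== CLAIM (what is proved, stated in full; the proofs are below) =====
def Claim_equal_func : Prop := ∀ (A : List Int) (x : Int), Dom_func A x → Spec_func A x (func A x)

-- ===== LEMMAS AND PROOFS =====
-- triangular-number step: (1+(k+1))(k+1)//2 = (1+k)k//2 + (k+1) for 0 ≤ k
theorem pv_tri_step (k : Int) :
    PySem.Int.floordiv ((1 + (k + 1)) * (k + 1)) 2 =
    PySem.Int.floordiv ((1 + k) * k) 2 + (k + 1) := by
  obtain ⟨m, hm⟩ := Int.even_mul_succ_self k
  rw [PySem.Int.floordiv_eq_ediv_of_pos (by norm_num), PySem.Int.floordiv_eq_ediv_of_pos (by norm_num)]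
  have e1 : (1 + (k + 1)) * (k + 1) = 2 * (m + (k + 1)) := by linear_combination hm
  have e2 : (1 + k) * k = 2 * m := by linear_combination hm
  rw [e1, e2, Int.mul_ediv_cancel_left _ (by norm_num), Int.mul_ediv_cancel_left _ (by norm_num)]

theorem pv_tri_zero : PySem.Int.floordiv ((1 + (0:Int)) * 0) 2 = 0 := by
  rw [PySem.Int.floordiv_eq_ediv_of_pos (by norm_num)]; norm_num

-- loop invariant: B's state is (resA + tri(r-l), r-l)
theorem pv_loop (x : Int) (A : List Int) :
    ∀ (resA l r resB cur : Int), cur = r - l → 0 ≤ cur →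
      resB = resA + PySem.Int.floordiv ((1 + cur) * cur) 2 →
      (A.foldl (fun (st : Int × Int) a =>
          if a ≤ x then (st.1 + (st.2 + 1), st.2 + 1) else (st.1, 0)) (resB, cur)).1 =
      (let s := A.foldl (fun (st : Int × Int × Int) a =>
          if a > x then
            (st.1 + PySem.Int.floordiv ((1 + (st.2.2 - st.2.1)) * (st.2.2 - st.2.1)) 2, st.2.2 + 1, st.2.2 + 1)
          else
            (st.1, st.2.1, st.2.2 + 1)) (resA, l, r)
       s.1 + PySem.Int.floordiv ((1 + (s.2.2 - s.2.1)) * (s.2.2 - s.2.1)) 2) := by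
  induction A with
  | nil =>
    intro resA l r resB cur hc hnn hr
    subst hc
    simpa [List.foldl] using hr
  | cons a tl ih =>
    intro resA l r resB cur hc hnn hr
    simp only [List.foldl]
    by_cases h : a ≤ x
    · have hgt : ¬ a > x := by omega
      simp only [if_pos h, if_neg hgt]
      exact ih (resA) l (r + 1) (resB + (cur + 1)) (cur + 1) (by omega) (by omega)
        (by subst hc; rw [hr, pv_tri_step (r - l)]; ring)
    · have hgt : a > x := by omega
      simp only [if_neg h, if_pos hgt]
      exact ih (resA + PySem.Int.floordiv ((1 + (r - l)) * (r - l)) 2) (r + 1) (r + 1) resB 0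
        (by omega) (by omega)
        (by subst hc; rw [hr, pv_tri_zero]; ring)

-- ===== VERDICT (by name: the statement is the Claim_ definition above) =====
theorem func_spec : Claim_equal_func := by
  intro A x _
  unfold Spec_func func func_alt
  exact (pv_loop x A 0 0 0 0 0 rfl le_rfl (by rw [pv_tri_zero]; ring)).symm
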